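-- pv_equiv track=rewrite | github.com/PJGoodman/Invisible-E.-coli | ExoMin.py | intersect_KO_Genes_Dicts
-- ===== SOURCE A (Python) =====
-- def intersect_KO_Genes_Dicts(dicts):
--     """
--     Intersects a list of dictionaries with the structure of updated_KO_Genes_Dict.
--
--     Parameters:
--     dicts (list of dict): The list of dictionaries to intersect.
--
--     Returns:
--     dict: A new dictionary containing only the entries found in all input dictionaries.
--     """
--     if not dicts:
--         return {}
--
--     # Start with the intersection dictionary as the first dictionary
--     intersection_dict = dicts[0]
--
--     # Iterate over the rest of the dictionaries to find the intersection
--     for other_dict in dicts[1:]: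
--         new_intersection_dict = {}
--
--         for metabolite_id in intersection_dict:
--             if metabolite_id in other_dict:
--                 intersection_reactions = {}
--                 for reaction_id in intersection_dict[metabolite_id]:
--                     if reaction_id in other_dict[metabolite_id]:
--                         # Add the reaction and its genes to the intersection dictionary
--                         intersection_reactions[reaction_id] = intersection_dict[metabolite_id][reaction_id]
--
--                 if intersection_reactions:
--                     new_intersection_dict[metabolite_id] = intersection_reactions
--
--         # Update the intersection dictionary
--         intersection_dict = new_intersection_dict
--
--     return intersection_dict
-- ===== SOURCE B (Python) =====
-- def intersect_KO_Genes_Dicts(dicts):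
--     """Single-pass intersection: keep dicts[0]-order metabolites present in every
--     dict, with the reactions present in every dict (gene values from dicts[0])."""
--     if len(dicts) < 2:
--         return dict(dicts[0]) if dicts else {}
--     rest = dicts[1:]
--     result = {}
--     for m, reactions in dicts[0].items():
--         if all(m in d for d in rest):
--             common = {r: g for r, g in reactions.items()
--                       if all(r in d[m] for d in rest)}
--             if common:
--                 result[m] = common
--     return result
-- ===== Notes on version B (the rewrite author's own statement) =====
-- stated objective: alternative
-- what changed: Instead of A's fold that rebuilds an intermediate intersection dict for every dict in dicts[1:], B makes one pass over dicts[0] and keeps each metabolite/reaction iff its key occurs in every other dict (all()-tests), taking values from dicts[0]. (Pre_ only bars association lists with duplicate keys, which no Python dict input can produce.)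
import Mathlib
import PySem

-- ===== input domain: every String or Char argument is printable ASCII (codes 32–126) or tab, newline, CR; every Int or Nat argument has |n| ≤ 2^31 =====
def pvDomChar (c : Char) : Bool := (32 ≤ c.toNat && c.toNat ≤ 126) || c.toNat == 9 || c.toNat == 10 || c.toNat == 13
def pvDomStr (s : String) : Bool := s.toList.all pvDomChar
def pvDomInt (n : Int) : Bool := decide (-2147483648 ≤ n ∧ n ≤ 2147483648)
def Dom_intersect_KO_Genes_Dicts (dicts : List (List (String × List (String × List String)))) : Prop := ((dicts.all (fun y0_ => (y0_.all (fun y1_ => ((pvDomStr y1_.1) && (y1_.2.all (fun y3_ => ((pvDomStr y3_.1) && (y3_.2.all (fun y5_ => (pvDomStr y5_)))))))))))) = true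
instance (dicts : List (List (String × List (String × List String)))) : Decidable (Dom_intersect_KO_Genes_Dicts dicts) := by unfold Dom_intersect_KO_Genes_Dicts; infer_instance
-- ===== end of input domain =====

-- B replaces A's fold of pairwise dict intersections by ONE pass over dicts[0] with an
-- all-dicts membership test per metabolite/reaction (objective: alternative decomposition).

-- ===== PORT A =====
-- Python dict lookup (first match) and dict assignment (overwrite in place, new keys append),
-- exact on association lists.
def pvGet? {α : Type} (d : List (String × α)) (k : String) : Option α :=
  match d with
  | [] => none
  | (k', v) :: rest => if k' == k then some v else pvGet? rest k

def pvInsert {α : Type} (d : List (String × α)) (k : String) (v : α) : List (String × α) :=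
  match d with
  | [] => [(k, v)]
  | (k', v') :: rest => if k' == k then (k', v) :: rest else (k', v') :: pvInsert rest k v

-- one iteration of A's outer 'for other_dict in dicts[1:]' loop; 'for metabolite_id in
-- intersection_dict: … intersection_dict[metabolite_id]' is ported as iteration over the
-- (key, value) pairs, which is exact under Pre_ (unique keys).
def pvPairInter (cur other : List (String × List (String × List String))) : List (String × List (String × List String)) :=
  cur.foldl (fun nd p =>
    match pvGet? other p.1 with
    | none => nd
    | some ors =>
        let ir := p.2.foldl (fun c q => if (pvGet? ors q.1).isSome then pvInsert c q.1 q.2 else c) []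
        if ir = [] then nd else pvInsert nd p.1 ir) []

def intersect_KO_Genes_Dicts (dicts : List (List (String × List (String × List String)))) : List (String × List (String × List String)) :=
  match dicts with
  | [] => []
  | d0 :: rest => rest.foldl pvPairInter d0

-- ===== PORT B =====
-- transliteration of Source B: the dict comprehension over reactions.items() with unique keys is a
-- filter in dicts[0] order (exact under Pre_); 'result[m] = common' is pvInsert.
def intersect_KO_Genes_Dicts_alt (dicts : List (List (String × List (String × List String)))) : List (String × List (String × List String)) :=
  match dicts with
  | [] => []
  | [d] => d
  | d0 :: rest =>
      d0.foldl (fun res p =>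
        if rest.all (fun d => (pvGet? d p.1).isSome) then
          let common := p.2.filter (fun q => rest.all (fun d => (pvGet? ((pvGet? d p.1).getD []) q.1).isSome))
          if common = [] then res else pvInsert res p.1 common
        else res) []

-- ===== PRECONDITION & SPEC =====
def pvWF (d : List (String × List (String × List String))) : Bool :=
  decide ((d.map Prod.fst).Nodup) && d.all (fun p => decide ((p.2.map Prod.fst).Nodup))

-- Pre_ excludes inputs whose FIRST dictionary (or one of its reaction sub-dictionaries) has
-- duplicate keys: such association lists have no Python-dict counterpart (a Python dict
-- collapses duplicates on construction), so the ports' behaviour there mirrors nothing in A.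
def Pre_intersect_KO_Genes_Dicts (dicts : List (List (String × List (String × List String)))) : Prop :=
  ∀ d ∈ dicts.take 1, pvWF d = true
instance (dicts : List (List (String × List (String × List String)))) : Decidable (Pre_intersect_KO_Genes_Dicts dicts) := by unfold Pre_intersect_KO_Genes_Dicts; infer_instance

def pvWitness_intersect_KO_Genes_Dicts : (List (List (String × List (String × List String)))) :=
  [[("m", [("r", ["g"]), ("s", ["h"])]), ("n", [("r", ["g"])])], [("m", [("r", ["g2"])])]]

def Spec_intersect_KO_Genes_Dicts (dicts : List (List (String × List (String × List String)))) (out : List (String × List (String × List String))) : Prop := out = intersect_KO_Genes_Dicts_alt dicts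
instance (dicts : List (List (String × List (String × List String)))) (out : List (String × List (String × List String))) : Decidable (Spec_intersect_KO_Genes_Dicts dicts out) := by unfold Spec_intersect_KO_Genes_Dicts; infer_instance

-- ===== CLAIM (what is proved, stated in full; the proofs are below) =====
def Claim_equal_intersect_KO_Genes_Dicts : Prop := ∀ (dicts : List (List (String × List (String × List String)))), Dom_intersect_KO_Genes_Dicts dicts → Pre_intersect_KO_Genes_Dicts dicts → Spec_intersect_KO_Genes_Dicts dicts (intersect_KO_Genes_Dicts dicts)

-- ===== LEMMAS AND PROOFS =====

theorem pvInsert_of_not_mem {α : Type} (d : List (String × α)) (k : String) (v : α)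
    (h : k ∉ d.map Prod.fst) : pvInsert d k v = d ++ [(k, v)] := by
  induction d with
  | nil => rfl
  | cons p rest ih =>
    simp only [List.map_cons, List.mem_cons] at h
    have hne : p.1 ≠ k := fun e => h (Or.inl e.symm)
    have h2 : k ∉ rest.map Prod.fst := fun hm => h (Or.inr hm)
    simp [pvInsert, beq_iff_eq, hne, ih h2]

-- a loop 'if P q: c[q.key] = q.val' over pairs with fresh distinct keys builds acc ++ filter
theorem foldl_insert_filter {α : Type} (P : (String × α) → Bool) :
    ∀ (l acc : List (String × α)), (l.map Prod.fst).Nodup →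
    (∀ p ∈ l, p.1 ∉ acc.map Prod.fst) →
    l.foldl (fun c q => if P q then pvInsert c q.1 q.2 else c) acc = acc ++ l.filter P := by
  intro l
  induction l with
  | nil => intro acc _ _; simp
  | cons q rest ih =>
    intro acc hnd hdisj
    simp only [List.map_cons, List.nodup_cons] at hnd
    by_cases hq : P q
    · have hnm : q.1 ∉ acc.map Prod.fst := hdisj q (by simp)
      rw [List.foldl_cons, if_pos hq, pvInsert_of_not_mem _ _ _ hnm,
          ih (acc ++ [(q.1, q.2)]) hnd.2 ?_]
      · simp [hq]
      · intro p hp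
        simp only [List.map_append, List.mem_append, List.map_cons]
        rintro (h1 | h2)
        · exact hdisj p (List.mem_cons_of_mem _ hp) h1
        · simp only [List.map_nil, List.mem_singleton] at h2
          exact hnd.1 (h2 ▸ List.mem_map_of_mem hp)
    · rw [List.foldl_cons, if_neg hq, ih acc hnd.2 (fun p hp => hdisj p (List.mem_cons_of_mem _ hp))]
      simp [hq]

-- 'nd[p.key] = value of (f p)' when f p is some, else keep nd
def pvOptInsert {α β : Type} (f : (String × α) → Option (String × β))
    (nd : List (String × β)) (p : String × α) : List (String × β) :=
  match f p with | none => nd | some r => pvInsert nd r.1 r.2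

-- a loop inserting (f p) (when some, keyed by p.1) over distinct keys builds acc ++ filterMap f
theorem foldl_optInsert_filterMap {α β : Type} (f : (String × α) → Option (String × β))
    (hf : ∀ p r, f p = some r → r.1 = p.1) :
    ∀ (l : List (String × α)) (acc : List (String × β)), (l.map Prod.fst).Nodup →
    (∀ p ∈ l, p.1 ∉ acc.map Prod.fst) →
    l.foldl (pvOptInsert f) acc = acc ++ l.filterMap f := by
  intro l
  induction l with
  | nil => intro acc _ _; simp
  | cons q rest ih =>
    intro acc hnd hdisj
    simp only [List.map_cons, List.nodup_cons] at hnd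
    cases hfq : f q with
    | none =>
      simp only [List.foldl_cons, pvOptInsert, hfq]
      rw [ih acc hnd.2 (fun p hp => hdisj p (List.mem_cons_of_mem _ hp))]
      simp [hfq]
    | some r =>
      simp only [List.foldl_cons, pvOptInsert, hfq]
      have hk : r.1 = q.1 := hf q r hfq
      have hnm : r.1 ∉ acc.map Prod.fst := hk ▸ hdisj q (by simp)
      rw [pvInsert_of_not_mem _ _ _ hnm, ih (acc ++ [(r.1, r.2)]) hnd.2 ?_]
      · simp [hfq]
      · intro p hp
        simp only [List.map_append, List.mem_append, List.map_cons]
        rintro (h1 | h2)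
        · exact hdisj p (List.mem_cons_of_mem _ hp) h1
        · simp only [List.map_nil, List.mem_singleton] at h2
          rw [hk] at h2
          exact hnd.1 (h2 ▸ List.mem_map_of_mem hp)

-- A's per-metabolite step against ONE other dict, as an Option-valued function
def interF (other : List (String × List (String × List String))) (p : String × List (String × List String)) : Option (String × List (String × List String)) :=
  match pvGet? other p.1 with
  | none => none
  | some ors =>
      if p.2.filter (fun q => (pvGet? ors q.1).isSome) = [] then none
      else some (p.1, p.2.filter (fun q => (pvGet? ors q.1).isSome))

-- B's per-metabolite step against ALL remaining dicts, as an Option-valued function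
def allF (rest : List (List (String × List (String × List String)))) (p : String × List (String × List String)) : Option (String × List (String × List String)) :=
  if rest.all (fun d => (pvGet? d p.1).isSome) then
    if p.2.filter (fun q => rest.all (fun d => (pvGet? ((pvGet? d p.1).getD []) q.1).isSome)) = [] then none
    else some (p.1, p.2.filter (fun q => rest.all (fun d => (pvGet? ((pvGet? d p.1).getD []) q.1).isSome)))
  else none

theorem interF_key {other : List (String × List (String × List String))} :
    ∀ p r, interF other p = some r → r.1 = p.1 := by
  intro p r h
  unfold interF at h
  cases hg : pvGet? other p.1 <;> rw [hg] at h
  · exact absurd h (by simp)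
  · simp only at h
    split at h
    · exact absurd h (by simp)
    · exact (Option.some_inj.mp h) ▸ rfl

theorem allF_key {rest : List (List (String × List (String × List String)))} :
    ∀ p r, allF rest p = some r → r.1 = p.1 := by
  intro p r h
  unfold allF at h
  split at h
  · split at h
    · exact absurd h (by simp)
    · exact (Option.some_inj.mp h) ▸ rfl
  · exact absurd h (by simp)

theorem pvWF_iff (d : List (String × List (String × List String))) :
    pvWF d = true ↔ (d.map Prod.fst).Nodup ∧ ∀ p ∈ d, (p.2.map Prod.fst).Nodup := by
  simp [pvWF, List.all_eq_true]

-- characterisation of A's pairwise intersection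
theorem charA (cur other : List (String × List (String × List String))) (h : pvWF cur = true) :
    pvPairInter cur other = cur.filterMap (interF other) := by
  obtain ⟨hnd, hin⟩ := (pvWF_iff cur).mp h
  unfold pvPairInter
  have hcong : ∀ (nd : List (String × List (String × List String))) (p : String × List (String × List String)), p ∈ cur →
      (match pvGet? other p.1 with
       | none => nd
       | some ors =>
           let ir := p.2.foldl (fun c q => if (pvGet? ors q.1).isSome then pvInsert c q.1 q.2 else c) []
           if ir = [] then nd else pvInsert nd p.1 ir)
      = pvOptInsert (interF other) nd p := by
    intro nd p hp
    unfold interF pvOptInsert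
    cases hg : pvGet? other p.1 with
    | none => simp [hg]
    | some ors =>
      simp only [hg]
      rw [foldl_insert_filter (fun q => (pvGet? ors q.1).isSome) p.2 [] (hin p hp) (by simp)]
      simp only [List.nil_append]
      split <;> rfl
  rw [PySem.List.foldl_congr_mem cur _ (pvOptInsert (interF other)) [] hcong,
    foldl_optInsert_filterMap (interF other) interF_key cur [] hnd (by simp)]
  simp

-- characterisation of B's single pass (only top-level key uniqueness is needed)
theorem charB (d0 o : List (String × List (String × List String)))
    (rest : List (List (String × List (String × List String))))
    (hnd : (d0.map Prod.fst).Nodup) :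
    intersect_KO_Genes_Dicts_alt (d0 :: o :: rest) = d0.filterMap (allF (o :: rest)) := by
  show d0.foldl _ [] = _
  have hcong : ∀ (res : List (String × List (String × List String))) (p : String × List (String × List String)), p ∈ d0 →
      (if (o :: rest).all (fun d => (pvGet? d p.1).isSome) then
         let common := p.2.filter (fun q => (o :: rest).all (fun d => (pvGet? ((pvGet? d p.1).getD []) q.1).isSome))
         if common = [] then res else pvInsert res p.1 common
       else res)
      = pvOptInsert (allF (o :: rest)) res p := by
    intro res p _
    simp only [allF, pvOptInsert]
    split
    · split <;> rfl
    · rfl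
  rw [PySem.List.foldl_congr_mem d0 _ (pvOptInsert (allF (o :: rest))) [] hcong,
    foldl_optInsert_filterMap (allF (o :: rest)) allF_key d0 [] hnd (by simp)]
  simp

-- the keys of a key-preserving filterMap form a sublist of the original keys
theorem keys_filterMap_sublist {α β : Type} (f : (String × α) → Option (String × β))
    (hf : ∀ p r, f p = some r → r.1 = p.1) (l : List (String × α)) :
    ((l.filterMap f).map Prod.fst).Sublist (l.map Prod.fst) := by
  induction l with
  | nil => simp
  | cons q rest ih =>
    rw [List.filterMap_cons]
    cases hfq : f q with
    | none =>
      simp only [List.map_cons]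
      exact ih.cons q.1
    | some r =>
      simp only [List.map_cons, hf q r hfq]
      exact ih.cons₂ q.1

theorem pvWF_filterMap_interF (cur other : List (String × List (String × List String)))
    (h : pvWF cur = true) : pvWF (cur.filterMap (interF other)) = true := by
  obtain ⟨hnd, hin⟩ := (pvWF_iff cur).mp h
  rw [pvWF_iff]
  refine ⟨(keys_filterMap_sublist (interF other) interF_key cur).nodup hnd, ?_⟩
  intro p' hp'
  obtain ⟨p, hp, hfp⟩ := List.mem_filterMap.mp hp'
  unfold interF at hfp
  cases hg : pvGet? other p.1 <;> rw [hg] at hfp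
  · exact absurd hfp (by simp)
  · simp only at hfp
    split at hfp
    · exact absurd hfp (by simp)
    · have := Option.some_inj.mp hfp
      subst this
      exact (List.filter_sublist.map Prod.fst).nodup (hin p hp)

-- composing A's one-dict step with B's pass over the remaining dicts is B's pass over all of them
theorem interF_bind_allF (o : List (String × List (String × List String)))
    (rest : List (List (String × List (String × List String)))) (p : String × List (String × List String)) :
    (interF o p).bind (allF rest) = allF (o :: rest) p := by
  cases hg : pvGet? o p.1 with
  | none => simp [interF, allF, hg]
  | some ors =>
    simp only [interF, allF, hg, List.all_cons, Option.isSome_some, Bool.true_and,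
      Option.getD_some]
    by_cases hir : p.2.filter (fun q => (pvGet? ors q.1).isSome) = []
    · have hc : p.2.filter (fun q => (pvGet? ors q.1).isSome &&
          rest.all (fun d => (pvGet? ((pvGet? d p.1).getD []) q.1).isSome)) = [] := by
        rw [List.filter_eq_nil_iff] at hir ⊢
        intro q hq hq2
        exact hir q hq (Bool.and_elim_left hq2)
      rw [if_pos hir, hc]
      simp
    · rw [if_neg hir, Option.bind_some]
      have hfilt : (p.2.filter (fun q => (pvGet? ors q.1).isSome)).filter
            (fun q => rest.all (fun d => (pvGet? ((pvGet? d p.1).getD []) q.1).isSome))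
          = p.2.filter (fun q => (pvGet? ors q.1).isSome &&
              rest.all (fun d => (pvGet? ((pvGet? d p.1).getD []) q.1).isSome)) := by
        rw [List.filter_filter]
        exact List.filter_congr (fun q _ => Bool.and_comm _ _)
      rw [hfilt]

-- an interF result is never an empty reaction dict
theorem interF_some_snd_ne (o : List (String × List (String × List String)))
    (p r : String × List (String × List String)) (h : interF o p = some r) : r.2 ≠ [] := by
  unfold interF at h
  cases hg : pvGet? o p.1 with
  | none => rw [hg] at h; exact absurd h (by simp)
  | some ors =>
    rw [hg] at h
    simp only at h
    by_cases hir : p.2.filter (fun q => (pvGet? ors q.1).isSome) = []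
    · rw [if_pos hir] at h; exact absurd h (by simp)
    · rw [if_neg hir] at h
      have := Option.some_inj.mp h
      subst this
      simpa using hir

-- B's pass over no remaining dicts keeps any nonempty entry
theorem allF_nil (r : String × List (String × List String)) (h : r.2 ≠ []) :
    allF [] r = some r := by
  simp [allF, h]

-- the main induction: A's fold of pairwise intersections is one filterMap with allF
theorem foldl_pairInter_eq (o : List (String × List (String × List String)))
    (rest : List (List (String × List (String × List String)))) :
    ∀ d0, pvWF d0 = true →
    List.foldl pvPairInter d0 (o :: rest) = d0.filterMap (allF (o :: rest)) := by
  induction rest generalizing o with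
  | nil =>
    intro d0 h
    rw [List.foldl_cons, List.foldl_nil, charA d0 o h]
    refine List.filterMap_congr (fun p _ => ?_)
    rw [← interF_bind_allF o [] p]
    cases hf : interF o p with
    | none => rfl
    | some r => simp [allF_nil r (interF_some_snd_ne o p r hf)]
  | cons o' rest' ih =>
    intro d0 h
    rw [List.foldl_cons, ih o' (pvPairInter d0 o) (by rw [charA d0 o h]; exact pvWF_filterMap_interF d0 o h),
        charA d0 o h, List.filterMap_filterMap]
    exact List.filterMap_congr (fun p _ => interF_bind_allF o (o' :: rest') p)

-- ===== VERDICT (by name: the statement is the Claim_ definition above) =====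
theorem intersect_KO_Genes_Dicts_spec : Claim_equal_intersect_KO_Genes_Dicts := by
  intro dicts _ hpre
  unfold Spec_intersect_KO_Genes_Dicts
  match dicts with
  | [] => rfl
  | [d] => rfl
  | d0 :: o :: rest =>
    have hwf : pvWF d0 = true := hpre d0 (by simp)
    show List.foldl pvPairInter d0 (o :: rest) = _
    rw [foldl_pairInter_eq o rest d0 hwf,
        charB d0 o rest ((pvWF_iff d0).mp hwf).1]
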